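-- pv_equiv track=rewrite | github.com/sxnpu/MihomoRules | tools/extract_private_trackers.py | build_suffix_map
-- ===== SOURCE A (Python) =====
-- from collections import defaultdict
-- from typing import Dict, List, Set, Tuple
--
-- def build_suffix_map(hosts: Set[str]) -> Dict[str, Set[str]]:
--     m: Dict[str, Set[str]] = defaultdict(set)
--     for h in hosts:
--         labels = h.split(".")
--         if len(labels) < 2:
--             continue
--         for k in range(2, len(labels) + 1):
--             suf = ".".join(labels[-k:])
--             m[suf].add(h)
--     return m
-- ===== SOURCE B (Python) =====
-- from collections import defaultdict
--
-- def build_suffix_map(hosts):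
--     # scan each host string for dots instead of splitting into labels
--     m = defaultdict(set)
--     for h in hosts:
--         starts = [i + 1 for i in range(len(h)) if h[i] == "."]
--         starts.reverse()
--         starts.append(0)
--         for start in starts:
--             suf = h[start:]
--             if "." in suf:
--                 m[suf].add(h)
--     return m
-- ===== Notes on version B (the rewrite author's own statement) =====
-- stated objective: alternative
-- what changed: Instead of splitting each host into a label list and re-joining the last k labels for every k, B scans the host string once for dot positions and takes direct string suffixes h[start:], keeping those that still contain a dot; no label list or join is ever built.
import Mathlib
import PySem

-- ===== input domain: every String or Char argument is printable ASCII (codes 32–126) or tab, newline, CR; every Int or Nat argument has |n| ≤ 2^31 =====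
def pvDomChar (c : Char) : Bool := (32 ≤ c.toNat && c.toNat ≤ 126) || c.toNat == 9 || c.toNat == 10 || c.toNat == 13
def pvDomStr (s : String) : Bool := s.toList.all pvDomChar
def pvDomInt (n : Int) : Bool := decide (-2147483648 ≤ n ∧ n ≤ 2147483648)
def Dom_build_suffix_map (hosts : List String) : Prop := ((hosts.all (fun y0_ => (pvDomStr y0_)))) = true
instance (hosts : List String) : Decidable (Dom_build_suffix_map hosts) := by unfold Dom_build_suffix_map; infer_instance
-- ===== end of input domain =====

-- B scans each host for dot positions and takes direct string suffixes instead of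
-- splitting into labels and re-joining the last k labels for every k (objective: alternative).

-- ===== PORT A =====
def build_suffix_map (hosts : List String) : List (String × List String) :=
  (hosts.foldl (fun (m : PySem.Dict String (PySem.Set String)) h =>
      let labels := (PySem.Str.split? h ".").getD []
      if labels.length < 2 then m
      else
        (PySem.List.pyRange 2 ((labels.length : Int) + 1) 1).foldl
          (fun m k =>
            let suf := PySem.Str.join "." (PySem.List.slice labels (some (-k)) none)
            m.modify suf PySem.Set.empty (fun s => PySem.Set.add s h)) m)
    PySem.Dict.empty).items

-- ===== PORT B =====
def build_suffix_map_alt (hosts : List String) : List (String × List String) :=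
  (hosts.foldl (fun (m : PySem.Dict String (PySem.Set String)) h =>
      let starts :=
        (((PySem.List.pyRange 0 (PySem.Str.len h) 1).filter
            (fun i => PySem.Str.pyGet? h i == some '.')).map (fun i => i + 1)).reverse ++ [0]
      starts.foldl
        (fun m start =>
          let suf := PySem.Str.slice h (some start) none
          if PySem.Str.isIn "." suf then m.modify suf PySem.Set.empty (fun s => PySem.Set.add s h)
          else m) m)
    PySem.Dict.empty).items

-- ===== PRECONDITION & SPEC =====
def Spec_build_suffix_map (hosts : List String) (out : List (String × List String)) : Prop := out = build_suffix_map_alt hosts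
instance (hosts : List String) (out : List (String × List String)) : Decidable (Spec_build_suffix_map hosts out) := by unfold Spec_build_suffix_map; infer_instance

-- ===== CLAIM (what is proved, stated in full; the proofs are below) =====
def Claim_equal_build_suffix_map : Prop := ∀ (hosts : List String), Dom_build_suffix_map hosts → Spec_build_suffix_map hosts (build_suffix_map hosts)

-- ===== LEMMAS AND PROOFS =====

-- the per-suffix dict update both programs perform
def pvUpd (h : String) (m : PySem.Dict String (PySem.Set String)) (suf : String) :
    PySem.Dict String (PySem.Set String) :=
  m.modify suf PySem.Set.empty (fun s => PySem.Set.add s h)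

-- the list of suffixes A registers for one host, in order
def sufsA (h : String) : List String :=
  let labels := (PySem.Str.split? h ".").getD []
  if labels.length < 2 then []
  else (PySem.List.pyRange 2 ((labels.length : Int) + 1) 1).map
    (fun k => PySem.Str.join "." (PySem.List.slice labels (some (-k)) none))

-- the list of suffixes B registers for one host, in order
def sufsB (h : String) : List String :=
  ((((PySem.List.pyRange 0 (PySem.Str.len h) 1).filter
        (fun i => PySem.Str.pyGet? h i == some '.')).map (fun i => i + 1)).reverse ++ [0]).map
      (fun start => PySem.Str.slice h (some start) none)
    |>.filter (fun suf => PySem.Str.isIn "." suf)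

lemma foldA (hosts : List String) :
    build_suffix_map hosts =
      (hosts.foldl (fun m h => (sufsA h).foldl (pvUpd h) m) PySem.Dict.empty).items := by
  unfold build_suffix_map
  congr 1
  congr 1
  funext m h
  simp only [sufsA]
  by_cases hc : ((PySem.Str.split? h ".").getD []).length < 2
  · simp [hc]
  · simp only [hc, if_false, List.foldl_map]
    rfl

lemma foldB (hosts : List String) :
    build_suffix_map_alt hosts =
      (hosts.foldl (fun m h => (sufsB h).foldl (pvUpd h) m) PySem.Dict.empty).items := by
  unfold build_suffix_map_alt
  congr 1
  congr 1
  funext m h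
  simp only [sufsB, pvUpd, List.foldl_filter, List.foldl_map]

-- char-level versions
def pvPos (cs : List Char) : List Nat :=
  (List.range cs.length).filter (fun i => cs[i]? == some '.')

def pvDropsA (ls : List (List Char)) : List (List Char) :=
  (List.range (ls.length - 1)).map (fun i => ['.'].intercalate (ls.drop (ls.length - (i + 2))))

def pvCandB (cs : List Char) : List (List Char) :=
  (((pvPos cs).map (fun i => i + 1)).reverse ++ [0]).map (fun st => cs.drop st)

def pvDropsB (cs : List Char) : List (List Char) :=
  (pvCandB cs).filter (fun suf => PySem.Chars.isIn ['.'] suf)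

lemma pos_cons (c : Char) (cs : List Char) :
    pvPos (c :: cs) = (if c = '.' then [0] else []) ++ (pvPos cs).map (· + 1) := by
  simp only [pvPos, List.length_cons, List.range_succ_eq_map, List.filter_cons,
    List.getElem?_cons_zero, List.filter_map]
  split <;> simp_all [Function.comp_def]

lemma pos_dotfree (l : List Char) (hl : '.' ∉ l) : pvPos l = [] := by
  induction l with
  | nil => rfl
  | cons c cs ih =>
    rw [pos_cons]
    simp only [List.mem_cons, not_or] at hl
    rw [ih hl.2, if_neg (fun hcc => hl.1 hcc.symm)]
    rfl

lemma pos_append_dot (l cs' : List Char) (hl : '.' ∉ l) :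
    pvPos (l ++ '.' :: cs') = l.length :: (pvPos cs').map (· + (l.length + 1)) := by
  induction l with
  | nil => simp [pos_cons]
  | cons c l ih =>
    simp only [List.mem_cons, not_or] at hl
    rw [List.cons_append, pos_cons, ih hl.2, if_neg (fun hcc => hl.1 hcc.symm)]
    simp only [List.nil_append, List.map_cons, List.map_map, Function.comp_def, List.length_cons]
    congr 1

lemma candB_step (l cs' : List Char) (hl : '.' ∉ l) :
    pvCandB (l ++ '.' :: cs') = pvCandB cs' ++ [l ++ '.' :: cs'] := by
  have hd : ∀ a : Nat, (l ++ '.' :: cs').drop (a + (l.length + 1) + 1) = cs'.drop (a + 1) := by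
    intro a
    rw [show a + (l.length + 1) + 1 = l.length + (a + 2) by omega,
      List.drop_length_add_append, List.drop_succ_cons]
  have hd0 : (l ++ '.' :: cs').drop (l.length + 1) = cs' := by
    rw [List.drop_length_add_append, List.drop_succ_cons, List.drop_zero]
  simp only [pvCandB, pos_append_dot l cs' hl, List.map_cons, List.reverse_cons,
    List.map_append, List.map_map, Function.comp_def, List.drop_zero, hd0]
  rw [← List.map_reverse, ← List.map_reverse, List.map_map]
  simp only [Function.comp_def, hd]
  simp [List.append_assoc]

lemma splitOnP_dotfree {α : Type} (p : α → Bool) (xs : List α) :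
    ∀ x ∈ xs.splitOnP p, ∀ a ∈ x, ¬ p a := by
  induction xs with
  | nil =>
    intro x hx
    rw [List.splitOnP_nil, List.mem_singleton] at hx
    subst hx; simp
  | cons c cs ih =>
    intro x hx a ha
    rw [List.splitOnP_cons] at hx
    by_cases hc : p c
    · rw [if_pos hc, List.mem_cons] at hx
      rcases hx with rfl | h2
      · simp at ha
      · exact ih x h2 a ha
    · rw [if_neg hc] at hx
      obtain ⟨y, ys, hys⟩ := List.exists_cons_of_ne_nil (List.splitOnP_ne_nil p cs)
      rw [hys, List.modifyHead_cons, List.mem_cons] at hx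
      rcases hx with rfl | h2
      · rcases List.mem_cons.mp ha with rfl | ha2
        · exact hc
        · exact ih y (hys ▸ List.mem_cons_self) a ha2
      · exact ih x (hys ▸ List.mem_cons_of_mem _ h2) a ha

-- main char-level equality via the intercalate representation
lemma intercalate_one (l : List Char) : ['.'].intercalate [l] = l := by
  simp [List.intercalate]

lemma intercalate_cons₂ (l b : List Char) (tl : List (List Char)) :
    ['.'].intercalate (l :: b :: tl) = l ++ '.' :: ['.'].intercalate (b :: tl) := by
  simp [List.intercalate, List.intersperse_cons₂, List.flatten_cons]

lemma dropsA_step (l : List Char) (ls : List (List Char)) (hne : ls ≠ []) :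
    pvDropsA (l :: ls) = pvDropsA ls ++ [['.'].intercalate (l :: ls)] := by
  obtain ⟨x, xs, rfl⟩ := List.exists_cons_of_ne_nil hne
  simp only [pvDropsA, List.length_cons, Nat.add_sub_cancel]
  rw [List.range_succ, List.map_append]
  congr 1
  · apply List.map_congr_left
    intro i hi
    rw [List.mem_range] at hi
    rw [show xs.length + 1 + 1 - (i + 2) = (xs.length + 1 - (i + 2)) + 1 by omega,
      List.drop_succ_cons]
  · simp

lemma drops_eq_aux (ls : List (List Char)) (hne : ls ≠ []) (hfree : ∀ l ∈ ls, '.' ∉ l) :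
    pvDropsB (['.'].intercalate ls) = pvDropsA ls := by
  induction ls with
  | nil => exact absurd rfl hne
  | cons l ls ih =>
    cases ls with
    | nil =>
      have hl : '.' ∉ l := hfree l List.mem_cons_self
      rw [intercalate_one]
      have hc : pvCandB l = [l] := by simp [pvCandB, pos_dotfree l hl]
      have hni : PySem.Chars.isIn ['.'] l = false :=
        (PySem.Chars.isIn_eq_false_iff _ _).mpr (fun hin => hl ((List.singleton_infix_iff '.' l).mp hin))
      simp [pvDropsB, pvDropsA, hc, hni]
    | cons b tl =>
      have hl : '.' ∉ l := hfree l List.mem_cons_self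
      have hcs := intercalate_cons₂ l b tl
      have hmem : '.' ∈ l ++ '.' :: ['.'].intercalate (b :: tl) :=
        List.mem_append_right _ List.mem_cons_self
      have hin : PySem.Chars.isIn ['.'] (l ++ '.' :: ['.'].intercalate (b :: tl)) = true :=
        (PySem.Chars.isIn_iff_infix _ _).mpr ((List.singleton_infix_iff _ _).mpr hmem)
      rw [hcs, pvDropsB, candB_step l _ hl, List.filter_append]
      rw [show (List.filter (fun suf => PySem.Chars.isIn ['.'] suf)
            [l ++ '.' :: ['.'].intercalate (b :: tl)]) =
          [l ++ '.' :: ['.'].intercalate (b :: tl)] by simp [hin]]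
      rw [← pvDropsB, ih (by simp) (fun x hx => hfree x (List.mem_cons_of_mem _ hx))]
      rw [dropsA_step l (b :: tl) (by simp), hcs]

lemma mh_id (l : List (List Char)) : List.modifyHead (fun x => x) l = l := by
  cases l <;> rfl

lemma go_eq (fuel : Nat) : ∀ (l cur : List Char) (acc : List (List Char)), l.length ≤ fuel →
    PySem.Chars.splitOn.go ['.'] fuel l cur acc =
      acc.reverse ++ (l.splitOnP (· == '.')).modifyHead (cur.reverse ++ ·) := by
  induction fuel with
  | zero =>
    intro l cur acc hl
    have hnil : l = [] := List.eq_nil_of_length_eq_zero (by omega)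
    subst hnil
    have h0 : PySem.Chars.splitOn.go ['.'] 0 [] cur acc = ((cur.reverse ++ []) :: acc).reverse := rfl
    rw [h0]
    simp [List.splitOnP_nil]
  | succ fuel ih =>
    intro l cur acc hl
    cases l with
    | nil =>
      have h0 : PySem.Chars.splitOn.go ['.'] (fuel + 1) [] cur acc = (cur.reverse :: acc).reverse := rfl
      rw [h0]
      simp [List.splitOnP_nil]
    | cons c rest =>
      have h0 : PySem.Chars.splitOn.go ['.'] (fuel + 1) (c :: rest) cur acc =
          if ['.'].isPrefixOf (c :: rest) then
            PySem.Chars.splitOn.go ['.'] fuel (List.drop ['.'].length (c :: rest)) [] (cur.reverse :: acc)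
          else PySem.Chars.splitOn.go ['.'] fuel rest (c :: cur) acc := rfl
      rw [h0]
      by_cases hc : c = '.'
      · subst hc
        rw [if_pos (by simp [List.isPrefixOf])]
        simp only [List.length_singleton, List.drop_succ_cons, List.drop_zero]
        rw [ih rest [] _ (by simpa using hl)]
        simp [List.splitOnP_cons, mh_id]
      · rw [if_neg (by simp [List.isPrefixOf, Ne.symm hc])]
        rw [ih rest (c :: cur) acc (by simpa using hl)]
        rw [List.splitOnP_cons, if_neg (by simpa using hc), List.modifyHead_modifyHead]
        congr 2
        funext x
        simp

lemma splitOn_bridge (cs : List Char) : PySem.Chars.splitOn cs ['.'] = cs.splitOn '.' := by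
  rw [PySem.Chars.splitOn, go_eq _ _ _ _ (by omega)]
  simp [List.splitOn, mh_id]

lemma drops_eq (cs : List Char) : pvDropsB cs = pvDropsA (cs.splitOn '.') := by
  have hne : cs.splitOn '.' ≠ [] := by
    rw [List.splitOn]; exact List.splitOnP_ne_nil _ _
  have hfree : ∀ l ∈ cs.splitOn '.', '.' ∉ l := by
    intro l hl hdot
    have := splitOnP_dotfree (· == '.') cs l (by rwa [List.splitOn] at hl) '.' hdot
    simp at this
  have h := drops_eq_aux (cs.splitOn '.') hne hfree
  rwa [List.intercalate_splitOn] at h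

lemma sufsA_toList (h : String) :
    (sufsA h).map String.toList = pvDropsA (h.toList.splitOn '.') := by
  have hsplit : PySem.Str.split? h "." = some ((h.toList.splitOn '.').map String.ofList) := by
    rw [PySem.Str.split?]
    have h2 : PySem.Chars.split? h.toList ".".toList = some (h.toList.splitOn '.') := by
      rw [PySem.Chars.split?]
      simp [splitOn_bridge]
    rw [h2]
    simp
  set ls := h.toList.splitOn '.' with hls
  have hlabels : (PySem.Str.split? h ".").getD [] = ls.map String.ofList := by rw [hsplit]; rfl
  by_cases hsz : ls.length < 2
  · simp only [sufsA, hlabels, List.length_map, if_pos hsz, List.map_nil]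
    simp [pvDropsA, show ls.length - 1 = 0 by omega]
  · simp only [sufsA, hlabels, List.length_map, if_neg hsz]
    rw [PySem.List.pyRange_of_pos _ _ (by norm_num : (0:Int) < 1)]
    rw [if_pos (by omega)]
    rw [show (((ls.length:Int) + 1 - 2 + 1 - 1)/1).toNat = ls.length - 1 by
      rw [Int.ediv_one]; omega]
    rw [List.map_map, List.map_map, pvDropsA]
    apply List.map_congr_left
    intro i hi
    rw [List.mem_range] at hi
    simp only [Function.comp_def]
    rw [show -((2:Int) + 1 * ↑i) = -(((i + 2 : Nat)) : Int) by push_cast; ring]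
    rw [PySem.List.slice_from_neg_natCast _ _ (by omega), List.length_map]
    rw [PySem.Str.toList_join, ← List.map_drop, List.map_map]
    simp [PySem.Chars.join, Function.comp_def, String.toList_ofList]

lemma pyRange0 (n : Nat) :
    PySem.List.pyRange 0 (n : Int) 1 = (List.range n).map (fun j : Nat => (j : Int)) := by
  rw [PySem.List.pyRange_of_pos _ _ (by norm_num : (0:Int) < 1)]
  rw [show (if (0:Int) < (n:Int) then (((n:Int) - 0 + 1 - 1)/1).toNat else 0) = n by
    split <;> omega]
  apply List.map_congr_left
  intro j _
  ring

lemma sufsB_toList (h : String) : (sufsB h).map String.toList = pvDropsB h.toList := by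
  rw [sufsB, pvDropsB]
  have hp : (fun suf => PySem.Str.isIn "." suf) =
      ((fun t => PySem.Chars.isIn ['.'] t) ∘ String.toList) := by
    funext suf
    rw [Function.comp_apply, PySem.Str.isIn_eq]
    rfl
  rw [hp, ← List.filter_map]
  congr 1
  have hstarts :
      (((PySem.List.pyRange 0 (PySem.Str.len h) 1).filter
          (fun i => PySem.Str.pyGet? h i == some '.')).map (fun i => i + 1)).reverse ++ [0] =
        (((pvPos h.toList).map (fun i => i + 1)).reverse ++ [0]).map (fun j : Nat => (j : Int)) := by
    rw [PySem.Str.len_eq, pyRange0, List.filter_map]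
    rw [show ((fun i => PySem.Str.pyGet? h i == some '.') ∘ (fun j : Nat => (j : Int))) =
        (fun i : Nat => h.toList[i]? == some '.') by
      funext j
      rw [Function.comp_apply, PySem.Str.pyGet?_natCast]]
    rw [show (List.range h.toList.length).filter (fun i : Nat => h.toList[i]? == some '.') =
      pvPos h.toList from rfl]
    rw [List.map_map]
    rw [show ((fun i : Int => i + 1) ∘ (fun j : Nat => (j : Int))) =
        ((fun j : Nat => (j : Int)) ∘ (fun j : Nat => j + 1)) by
      funext j
      simp]
    rw [← List.map_map, ← List.map_reverse, List.map_append, List.map_cons, List.map_nil]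
    norm_num
  rw [hstarts, List.map_map, List.map_map, pvCandB]
  apply List.map_congr_left
  intro st _
  simp only [Function.comp_apply]
  rw [PySem.Str.toList_slice, PySem.Chars.slice_eq_listSlice, PySem.List.slice_from_natCast]

lemma sufs_eq (h : String) : sufsA h = sufsB h := by
  have := List.map_injective_iff.mpr (fun a b hab => String.toList_inj.mp hab)
  apply this
  rw [sufsA_toList, sufsB_toList, drops_eq]

-- ===== VERDICT (by name: the statement is the Claim_ definition above) =====
theorem build_suffix_map_spec : Claim_equal_build_suffix_map := by
  intro hosts _
  show build_suffix_map hosts = build_suffix_map_alt hosts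
  rw [foldA, foldB]
  have : (fun m h => (sufsA h).foldl (pvUpd h) m) = (fun m h => (sufsB h).foldl (pvUpd h) m) := by
    funext m h; rw [sufs_eq]
  rw [this]
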